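-- pv_equiv track=rewrite | github.com/drapindesigner/building-number-detection | perception/domain.py | _numeric_variants
-- ===== SOURCE A (Python) =====
-- from typing import Iterable, Optional, Set
--
-- _DIGIT_LOOKALIKE = {
--     "O": ["0"],
--     "Q": ["0"],
--     "D": ["0"],
--     "I": ["1"],
--     "L": ["1"],
--     "T": ["1"],
--     "Z": ["2"],
--     "S": ["5"],
--     "G": ["6"],
--     "B": ["8"],
-- }
--
-- def _numeric_variants(text: str) -> Set[str]:
--     options: list[list[str]] = []
--     for ch in text:
--         if ch.isdigit():
--             options.append([ch])
--             continue
--         replacements = _DIGIT_LOOKALIKE.get(ch, [])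
--         if not replacements:
--             return set()
--         options.append(replacements)
--
--     variants: Set[str] = set()
--     def _build(idx: int, buffer: list[str]) -> None:
--         if idx == len(options):
--             variants.add("".join(buffer))
--             return
--         for candidate in options[idx]:
--             buffer.append(candidate)
--             _build(idx + 1, buffer)
--             buffer.pop()
--
--     _build(0, [])
--     return variants
-- ===== SOURCE B (Python) =====
-- _DIGIT_LOOKALIKE = {
--     "O": ["0"],
--     "Q": ["0"],
--     "D": ["0"],
--     "I": ["1"],
--     "L": ["1"],
--     "T": ["1"],
--     "Z": ["2"],
--     "S": ["5"],
--     "G": ["6"],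
--     "B": ["8"],
-- }
--
-- def _numeric_variants(text):
--     variants = [""]
--     for ch in text:
--         if ch.isdigit():
--             opts = [ch]
--         else:
--             opts = _DIGIT_LOOKALIKE.get(ch)
--             if opts is None:
--                 return set()
--         variants = [v + o for v in variants for o in opts]
--     return set(variants)
-- ===== Notes on version B (the rewrite author's own statement) =====
-- stated objective: simpler
-- what changed: Replaces A's two-phase design (build an options table, then a recursive DFS with a mutable buffer writing into a closed-over set) with a single pass that grows a frontier of variant strings by a Cartesian-product comprehension per character.
import Mathlib
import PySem

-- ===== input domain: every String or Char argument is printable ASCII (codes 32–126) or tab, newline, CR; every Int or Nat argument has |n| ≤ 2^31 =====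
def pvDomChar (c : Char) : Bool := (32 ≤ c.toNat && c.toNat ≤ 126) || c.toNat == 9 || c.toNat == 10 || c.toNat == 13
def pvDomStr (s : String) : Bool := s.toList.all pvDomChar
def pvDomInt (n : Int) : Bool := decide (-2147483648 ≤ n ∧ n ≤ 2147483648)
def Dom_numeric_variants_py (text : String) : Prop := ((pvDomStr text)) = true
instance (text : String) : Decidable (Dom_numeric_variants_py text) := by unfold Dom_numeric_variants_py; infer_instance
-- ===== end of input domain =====

-- B replaces A's options-table + recursive DFS with one pass growing a frontier of
-- variants by a Cartesian-product comprehension per character (objective: simpler).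
-- Strings are modelled as List Char internally (exact: Python str concatenation = list append),
-- realised as String at the ends.

-- ===== PORT A =====
-- _DIGIT_LOOKALIKE: each value is a list of replacement strings (strings as List Char)
def pvLookalike : PySem.Dict Char (List (List Char)) :=
  PySem.Dict.ofList
  [('O', [['0']]), ('Q', [['0']]), ('D', [['0']]), ('I', [['1']]), ('L', [['1']]),
   ('T', [['1']]), ('Z', [['2']]), ('S', [['5']]), ('G', [['6']]), ('B', [['8']])]

-- A's first loop: build the options table; 'return set()' = none
def pvOptionsA : List Char → Option (List (List (List Char)))
  | [] => some []
  | c :: rest =>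
    if PySem.Chars.isdigit c then (pvOptionsA rest).map (fun os => [[c]] :: os)
    else
      let repl := PySem.Dict.getD pvLookalike c []
      if repl.isEmpty then none
      else (pvOptionsA rest).map (fun os => repl :: os)

-- A's _build DFS: buffer grows by append, leaves are added to the variants set
def pvBuildA : List (List (List Char)) → List Char → PySem.Set String → PySem.Set String
  | [], buf, s => PySem.Set.add s (String.ofList buf)
  | opts :: rest, buf, s => opts.foldl (fun s cand => pvBuildA rest (buf ++ cand) s) s

def numeric_variants_py (text : String) : List String :=
  match pvOptionsA text.toList with
  | none => []
  | some os => pvBuildA os [] PySem.Set.empty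

-- ===== PORT B =====
-- B's loop: frontier of variants, replaced each step by the product with this char's options
def pvGrowB : List Char → List (List Char) → Option (List (List Char))
  | [], vs => some vs
  | c :: rest, vs =>
    let opts? := if PySem.Chars.isdigit c then some [[c]]
                 else PySem.Dict.get? pvLookalike c
    match opts? with
    | none => none
    | some opts => pvGrowB rest (vs.flatMap (fun v => opts.map (fun o => v ++ o)))

def numeric_variants_py_alt (text : String) : List String :=
  match pvGrowB text.toList [[]] with
  | none => []
  | some vs => PySem.Set.ofList (vs.map String.ofList)

-- ===== PRECONDITION & SPEC =====
def Spec_numeric_variants_py (text : String) (out : List String) : Prop := out = numeric_variants_py_alt text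
instance (text : String) (out : List String) : Decidable (Spec_numeric_variants_py text out) := by unfold Spec_numeric_variants_py; infer_instance

-- ===== CLAIM (what is proved, stated in full; the proofs are below) =====
def Claim_equal_numeric_variants_py : Prop := ∀ (text : String), Dom_numeric_variants_py text → Spec_numeric_variants_py text (numeric_variants_py text)

-- ===== LEMMAS AND PROOFS =====

-- the DFS-order Cartesian product of an options table
def pvProd : List (List (List Char)) → List (List Char)
  | [] => [[]]
  | opts :: rest => opts.flatMap (fun o => (pvProd rest).map (fun t => o ++ t))

-- B's per-character option computation agrees with A's
set_option maxRecDepth 4000 in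
lemma pvOpt_agree (c : Char) :
    (if (PySem.Dict.getD pvLookalike c []).isEmpty then none
     else some (PySem.Dict.getD pvLookalike c [])) = PySem.Dict.get? pvLookalike c := by
  by_cases h0 : c = 'O'
  · subst h0; decide
  by_cases h1 : c = 'Q'
  · subst h1; decide
  by_cases h2 : c = 'D'
  · subst h2; decide
  by_cases h3 : c = 'I'
  · subst h3; decide
  by_cases h4 : c = 'L'
  · subst h4; decide
  by_cases h5 : c = 'T'
  · subst h5; decide
  by_cases h6 : c = 'Z'
  · subst h6; decide
  by_cases h7 : c = 'S'
  · subst h7; decide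
  by_cases h8 : c = 'G'
  · subst h8; decide
  by_cases h9 : c = 'B'
  · subst h9; decide
  have hitems : pvLookalike.items
      = [('O', [['0']]), ('Q', [['0']]), ('D', [['0']]), ('I', [['1']]), ('L', [['1']]),
         ('T', [['1']]), ('Z', [['2']]), ('S', [['5']]), ('G', [['6']]), ('B', [['8']])] := by
    decide
  have hget : PySem.Dict.get? pvLookalike c = none := by
    have hf : List.find? (fun p => p.1 == c) pvLookalike.items = none := by
      rw [List.find?_eq_none]
      intro x hx
      rw [hitems] at hx
      simp only [List.mem_cons, List.not_mem_nil, or_false] at hx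
      rcases hx with h|h|h|h|h|h|h|h|h|h <;> subst h <;>
        simp only [beq_iff_eq] <;> intro e <;>
        first
        | exact h0 e.symm | exact h1 e.symm | exact h2 e.symm | exact h3 e.symm
        | exact h4 e.symm | exact h5 e.symm | exact h6 e.symm | exact h7 e.symm
        | exact h8 e.symm | exact h9 e.symm
    simp [PySem.Dict.get?, hf]
  simp [PySem.Dict.getD_eq_get?_getD, hget]

-- folding set-updates over a list = one update of the concatenation
lemma foldl_update (f : List Char → List String) (opts : List (List Char))
    (s : PySem.Set String) :
    opts.foldl (fun s cand => PySem.Set.update s (f cand)) s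
      = PySem.Set.update s (opts.flatMap f) := by
  induction opts generalizing s with
  | nil => simp [PySem.Set.update]
  | cons o rest ih =>
    rw [List.flatMap_cons, PySem.Set.update_append, List.foldl_cons, ih]

-- A's DFS adds exactly the product strings, prefixed by the buffer, in DFS order
lemma pvBuildA_eq (os : List (List (List Char))) :
    ∀ (buf : List Char) (s : PySem.Set String),
    pvBuildA os buf s
      = PySem.Set.update s ((pvProd os).map (fun t => String.ofList (buf ++ t))) := by
  induction os with
  | nil => intro buf s; simp [pvBuildA, pvProd, PySem.Set.update]
  | cons opts rest ih =>
    intro buf s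
    have : pvBuildA (opts :: rest) buf s
        = opts.foldl (fun s cand =>
            PySem.Set.update s ((pvProd rest).map (fun t => String.ofList (buf ++ cand ++ t)))) s := by
      simp only [pvBuildA]
      rw [show (fun (s : PySem.Set String) cand => pvBuildA rest (buf ++ cand) s)
            = (fun s cand => PySem.Set.update s
                ((pvProd rest).map (fun t => String.ofList (buf ++ cand ++ t))))
          from funext fun s' => funext fun cand => ih (buf ++ cand) s']
    rw [this, foldl_update]
    simp [pvProd, List.map_flatMap, Function.comp_def, List.append_assoc]

-- B's frontier loop computes the product over A's options table
lemma pvGrowB_eq (cs : List Char) :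
    ∀ (vs : List (List Char)),
    pvGrowB cs vs
      = (pvOptionsA cs).map (fun os => vs.flatMap (fun v => (pvProd os).map (fun t => v ++ t))) := by
  induction cs with
  | nil => intro vs; simp [pvGrowB, pvOptionsA, pvProd]
  | cons c rest ih =>
    intro vs
    simp only [pvGrowB, pvOptionsA]
    by_cases hd : PySem.Chars.isdigit c
    · simp only [hd, if_true, ih, Option.map_map]
      cases pvOptionsA rest with
      | none => rfl
      | some os =>
        simp [pvProd, List.flatMap_assoc, List.map_flatMap, List.flatMap_map,
              Function.comp_def, List.append_assoc]
    · simp only [hd, if_false]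
      rw [← pvOpt_agree c]
      by_cases he : (PySem.Dict.getD pvLookalike c []).isEmpty
      · simp [he]
      · simp only [he, if_false, ih, Option.map_map]
        cases pvOptionsA rest with
        | none => rfl
        | some os =>
          simp [pvProd, List.flatMap_assoc, List.map_flatMap, List.flatMap_map,
                Function.comp_def, List.append_assoc]

-- ===== VERDICT (by name: the statement is the Claim_ definition above) =====
theorem numeric_variants_py_spec : Claim_equal_numeric_variants_py := by
  intro text _
  unfold Spec_numeric_variants_py numeric_variants_py numeric_variants_py_alt
  rw [pvGrowB_eq]
  cases h : pvOptionsA text.toList with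
  | none => rfl
  | some os =>
    simp only [Option.map_some]
    rw [pvBuildA_eq]
    simp [PySem.Set.update_nil_left]
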